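-- pv_equiv track=rewrite | github.com/KylieScharf/pycharm | love/name_check.py | name_check2
-- ===== SOURCE A (Python) =====
-- def name_check2(name):
--     #do for letter in the word dict[letter.upper and lower] = 0
--     dict = {
--         "lL": 0,
--         "oO": 0,
--         "vV":0,
--         "eE":0,
--         "sS":0
--     }
--     love_list = []
--     for item in dict: #for every item in the dictionary we chek all the letters in the name against it and see if they match and if they do we add one to the letter's score
--         for letter in name:
--             if letter in " " + str(item):
--                 dict[item] += 1
--         love_list.append(dict[item])
--     return love_list
-- ===== SOURCE B (Python) =====
-- def name_check2(name):
--     # one-pass frequency table, then constant-time lookups per group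
--     cnt = {}
--     for ch in name:
--         cnt[ch] = cnt.get(ch, 0) + 1
--     g = cnt.get
--     sp = g(' ', 0)
--     return [g('l', 0) + g('L', 0) + sp,
--             g('o', 0) + g('O', 0) + sp,
--             g('v', 0) + g('V', 0) + sp,
--             g('e', 0) + g('E', 0) + sp,
--             g('s', 0) + g('S', 0) + sp]
-- ===== Notes on version B (the rewrite author's own statement) =====
-- stated objective: faster
-- what changed: B builds one frequency table in a single pass over the name and assembles the five results by constant-time lookups (adding the space count to every group), instead of A's five full scans of the name each testing every letter against a 3-character string.
import Mathlib
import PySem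

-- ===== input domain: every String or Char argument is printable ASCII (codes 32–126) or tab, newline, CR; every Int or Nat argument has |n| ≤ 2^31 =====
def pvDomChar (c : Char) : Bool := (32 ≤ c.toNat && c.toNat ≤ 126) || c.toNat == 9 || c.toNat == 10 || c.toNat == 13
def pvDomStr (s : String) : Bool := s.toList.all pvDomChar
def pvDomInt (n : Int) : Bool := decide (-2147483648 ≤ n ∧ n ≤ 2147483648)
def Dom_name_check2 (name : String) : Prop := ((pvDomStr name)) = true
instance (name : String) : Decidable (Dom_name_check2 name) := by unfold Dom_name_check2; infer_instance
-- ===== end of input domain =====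

-- B replaces A's five full scans of the name (one per dict key) by one frequency table built in a
-- single pass plus constant-time lookups, adding the space count to every group; objective: idiomatic.

-- ===== PORT A =====
-- for every key of the dict, scan the whole name; 'letter in " " + item' is PySem.Chars.isIn of the
-- single-character string in the 3-character string
def name_check2 (name : String) : List Int :=
  let d0 : PySem.Dict String Int :=
    PySem.Dict.ofList [("lL", 0), ("oO", 0), ("vV", 0), ("eE", 0), ("sS", 0)]
  let st :=
    (PySem.Dict.keys d0).foldl
      (fun (st : PySem.Dict String Int × List Int) item =>
        let d' := name.toList.foldl
          (fun d letter =>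
            if PySem.Chars.isIn [letter] (' ' :: item.toList) then
              PySem.Dict.modify d item 0 (· + 1)
            else d) st.1
        (d', st.2 ++ [PySem.Dict.getD d' item 0]))
      (d0, [])
  st.2

-- ===== PORT B =====
def name_check2_alt (name : String) : List Int :=
  let cnt : PySem.Dict Char Int :=
    name.toList.foldl (fun d ch => PySem.Dict.insert d ch (PySem.Dict.getD d ch 0 + 1))
      PySem.Dict.empty
  let g := fun c => PySem.Dict.getD cnt c 0
  let sp := g ' '
  [g 'l' + g 'L' + sp, g 'o' + g 'O' + sp, g 'v' + g 'V' + sp, g 'e' + g 'E' + sp, g 's' + g 'S' + sp]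

-- ===== PRECONDITION & SPEC =====
def Spec_name_check2 (name : String) (out : List Int) : Prop := out = name_check2_alt name
instance (name : String) (out : List Int) : Decidable (Spec_name_check2 name out) := by unfold Spec_name_check2; infer_instance

-- ===== CLAIM (what is proved, stated in full; the proofs are below) =====
def Claim_equal_name_check2 : Prop := ∀ (name : String), Dom_name_check2 name → Spec_name_check2 name (name_check2 name)

-- ===== LEMMAS AND PROOFS =====

-- membership of a single character is list membership
lemma isIn_singleton (c : Char) (s : List Char) : PySem.Chars.isIn [c] s = s.contains c := by
  rcases h : s.contains c with _ | _
  · rw [PySem.Chars.isIn_eq_false_iff]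
    intro hi
    have : c ∈ s := (List.singleton_infix_iff c s).mp hi
    simp_all
  · rw [PySem.Chars.isIn_iff_infix, List.singleton_infix_iff]
    simp_all

-- A's inner loop increments the entry at its own key once per matching letter
lemma inner_getD_self (l : List Char) (d : PySem.Dict String Int) (k : String) (p : Char → Bool) :
    (l.foldl (fun d c => if p c then PySem.Dict.modify d k 0 (· + 1) else d) d).getD k 0
      = d.getD k 0 + (l.countP p : Int) := by
  induction l generalizing d with
  | nil => simp
  | cons c l ih =>
    rcases h : p c with _ | _
    · simp [h, ih]
    · simp [h, ih, PySem.Dict.getD_modify_self]; ring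

-- …and leaves every other key's entry unchanged
lemma inner_getD_ne (l : List Char) (d : PySem.Dict String Int) (k j : String) (hj : j ≠ k)
    (p : Char → Bool) :
    (l.foldl (fun d c => if p c then PySem.Dict.modify d k 0 (· + 1) else d) d).getD j 0
      = d.getD j 0 := by
  induction l generalizing d with
  | nil => rfl
  | cons c l ih =>
    rcases h : p c with _ | _ <;>
      simp [h, ih, PySem.Dict.getD_modify, hj]

-- counting letters of a three-character group is the sum of the three individual counts
lemma countP_group (a b c : Char) (hab : a ≠ b) (hac : a ≠ c) (hbc : b ≠ c) (l : List Char) :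
    (l.countP ((a :: b :: c :: List.nil).contains) : Int)
      = l.count b + l.count c + l.count a := by
  induction l with
  | nil => simp
  | cons x l ih =>
    simp only [List.countP_cons, List.count_cons]
    by_cases hxa : x = a <;> by_cases hxb : x = b <;> by_cases hxc : x = c <;>
      simp_all <;> omega

-- ===== VERDICT (by name: the statement is the Claim_ definition above) =====
theorem name_check2_spec : Claim_equal_name_check2 := by
  intro name _
  unfold Spec_name_check2 name_check2 name_check2_alt
  dsimp only
  rw [show (PySem.Dict.ofList [("lL", (0:Int)), ("oO", 0), ("vV", 0), ("eE", 0), ("sS", 0)]).keys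
        = ["lL", "oO", "vV", "eE", "sS"] from by decide]
  simp only [List.foldl_cons, List.foldl_nil,
    PySem.Dict.foldl_insert_getD_add_one_eq_counter, PySem.Dict.getD_counter, isIn_singleton]
  rw [inner_getD_self, inner_getD_self, inner_getD_self, inner_getD_self, inner_getD_self]
  rw [inner_getD_ne _ _ _ _ (by decide), inner_getD_ne _ _ _ _ (by decide),
    inner_getD_ne _ _ _ _ (by decide), inner_getD_ne _ _ _ _ (by decide),
    inner_getD_ne _ _ _ _ (by decide), inner_getD_ne _ _ _ _ (by decide),
    inner_getD_ne _ _ _ _ (by decide), inner_getD_ne _ _ _ _ (by decide),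
    inner_getD_ne _ _ _ _ (by decide), inner_getD_ne _ _ _ _ (by decide)]
  rw [show "lL".toList = ['l', 'L'] from rfl, show "oO".toList = ['o', 'O'] from rfl,
    show "vV".toList = ['v', 'V'] from rfl, show "eE".toList = ['e', 'E'] from rfl,
    show "sS".toList = ['s', 'S'] from rfl]
  rw [countP_group ' ' 'l' 'L' (by decide) (by decide) (by decide),
    countP_group ' ' 'o' 'O' (by decide) (by decide) (by decide),
    countP_group ' ' 'v' 'V' (by decide) (by decide) (by decide),
    countP_group ' ' 'e' 'E' (by decide) (by decide) (by decide),
    countP_group ' ' 's' 'S' (by decide) (by decide) (by decide)]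
  norm_num [show (PySem.Dict.ofList [("lL", (0:Int)), ("oO", 0), ("vV", 0), ("eE", 0), ("sS", 0)]).getD "lL" 0 = 0 from by decide,
    show (PySem.Dict.ofList [("lL", (0:Int)), ("oO", 0), ("vV", 0), ("eE", 0), ("sS", 0)]).getD "oO" 0 = 0 from by decide,
    show (PySem.Dict.ofList [("lL", (0:Int)), ("oO", 0), ("vV", 0), ("eE", 0), ("sS", 0)]).getD "vV" 0 = 0 from by decide,
    show (PySem.Dict.ofList [("lL", (0:Int)), ("oO", 0), ("vV", 0), ("eE", 0), ("sS", 0)]).getD "eE" 0 = 0 from by decide,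
    show (PySem.Dict.ofList [("lL", (0:Int)), ("oO", 0), ("vV", 0), ("eE", 0), ("sS", 0)]).getD "sS" 0 = 0 from by decide]
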